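-- pv_equiv track=rewrite | github.com/mateuszmacheta/codewars-python | Largest-Difference.py | largest_difference
-- ===== SOURCE A (Python) =====
-- from itertools import combinations
--
-- def largest_difference(data):
--     biggest = 0
--     for pair in combinations(enumerate(data), 2):
--         number_difference = pair[1][1] - pair[0][1]
--         if number_difference < 0: continue
--         index_difference = pair[1][0] - pair[0][0]
--         if index_difference > biggest:
--             biggest = index_difference
--     return biggest
-- ===== SOURCE B (Python) =====
-- def largest_difference(data):
--     # max width ramp: monotonic stack of strict prefix-minima indices, then one reverse scan
--     stack = []
--     for i, x in enumerate(data):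
--         if not stack or data[stack[-1]] > x:
--             stack.append(i)
--     best = 0
--     for j in range(len(data) - 1, -1, -1):
--         while stack and data[stack[-1]] <= data[j]:
--             i = stack.pop()
--             if j - i > best:
--                 best = j - i
--     return best
-- ===== Notes on version B (the rewrite author's own statement) =====
-- stated objective: faster
-- what changed: Replaced the O(n^2) scan over all index pairs with the O(n) maximum-width-ramp algorithm: a monotonic stack of strict prefix-minima indices followed by a single reverse scan that pops matches.
import Mathlib
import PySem

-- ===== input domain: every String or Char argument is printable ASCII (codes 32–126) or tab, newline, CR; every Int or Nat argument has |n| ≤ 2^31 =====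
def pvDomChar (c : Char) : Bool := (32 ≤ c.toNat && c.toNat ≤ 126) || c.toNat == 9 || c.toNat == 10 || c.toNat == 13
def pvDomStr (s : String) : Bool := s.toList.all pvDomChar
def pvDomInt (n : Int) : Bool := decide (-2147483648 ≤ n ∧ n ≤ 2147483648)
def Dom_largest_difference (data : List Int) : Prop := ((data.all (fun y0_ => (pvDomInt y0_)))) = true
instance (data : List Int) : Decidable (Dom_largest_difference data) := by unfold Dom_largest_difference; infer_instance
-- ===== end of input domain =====

-- B replaces A's O(n^2) all-pairs scan by the maximum-width-ramp algorithm
-- (monotonic stack of strict prefix minima + one reverse scan); objective: faster.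


-- ===== PORT A =====
-- itertools.combinations(l, 2) in CPython's index-lexicographic order, specialised to
-- pairs (exact: for r = 2 each emitted tuple is (l[i], l[j]) with i < j, in this order).
def pvComb2 {α : Type} : List α → List (α × α)
  | [] => []
  | x :: xs => (xs.map (fun y => (x, y))) ++ pvComb2 xs

def largest_difference (data : List Int) : Int :=
  (pvComb2 (PySem.List.enumerate data)).foldl
    (fun biggest pair =>
      let number_difference := pair.2.2 - pair.1.2
      if number_difference < 0 then biggest
      else
        let index_difference := pair.2.1 - pair.1.1
        if index_difference > biggest then index_difference else biggest)
    0

-- ===== PORT B =====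
-- first loop of Source B: stack of strict prefix-minima indices (head = python stack[-1]);
-- data[stack[-1]] is in range whenever read, so List.getD is exact here.
def pvBuild (data : List Int) : List Nat :=
  data.zipIdx.foldl
    (fun stack p =>
      match stack with
      | [] => p.2 :: stack
      | top :: _ => if data.getD top 0 > p.1 then p.2 :: stack else stack)
    []

-- inner while-loop of Source B (pop while data[stack[-1]] <= data[j], updating best)
def pvPop (data : List Int) (j : Nat) : List Nat → Nat → List Nat × Nat
  | [], best => ([], best)
  | top :: rest, best =>
      if data.getD top 0 ≤ data.getD j 0 then
        pvPop data j rest (if j - top > best then j - top else best)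
      else (top :: rest, best)

-- outer for-loop of Source B: j runs len(data)-1, …, 0 (argument is j+1)
def pvScan (data : List Int) : Nat → List Nat → Nat → Nat
  | 0, _, best => best
  | jn + 1, stack, best =>
      let r := pvPop data jn stack best
      pvScan data jn r.1 r.2

def largest_difference_alt (data : List Int) : Int :=
  (pvScan data data.length (pvBuild data) 0 : Nat)

-- ===== PRECONDITION & SPEC =====
def Spec_largest_difference (data : List Int) (out : Int) : Prop := out = largest_difference_alt data
instance (data : List Int) (out : Int) : Decidable (Spec_largest_difference data out) := by unfold Spec_largest_difference; infer_instance

-- ===== CLAIM (what is proved, stated in full; the proofs are below) =====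
def Claim_equal_largest_difference : Prop := ∀ (data : List Int), Dom_largest_difference data → Spec_largest_difference data (largest_difference data)

-- ===== LEMMAS AND PROOFS =====

/-- `(i, j)` is an admissible pair: `i ≤ j < |data|` and `data[i] ≤ data[j]`. -/
def GoodPair (data : List Int) (i j : Nat) : Prop :=
  i ≤ j ∧ j < data.length ∧ data.getD i 0 ≤ data.getD j 0

/-- `r` is the largest admissible index gap (0 if none). -/
def IsBest (data : List Int) (r : Int) : Prop :=
  0 ≤ r ∧ (∀ i j, GoodPair data i j → (j : Int) - (i : Int) ≤ r) ∧
    (r = 0 ∨ ∃ i j, GoodPair data i j ∧ r = (j : Int) - (i : Int))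

theorem isBest_unique {data : List Int} {r s : Int}
    (hr : IsBest data r) (hs : IsBest data s) : r = s := by
  obtain ⟨hr0, hrub, hrw⟩ := hr
  obtain ⟨hs0, hsub, hsw⟩ := hs
  have h1 : r ≤ s := by
    rcases hrw with h | ⟨i, j, hg, he⟩
    · omega
    · have := hsub i j hg; omega
  have h2 : s ≤ r := by
    rcases hsw with h | ⟨i, j, hg, he⟩
    · omega
    · have := hrub i j hg; omega
  omega

theorem mem_pvComb2 {α : Type} {l : List α} {p : α × α} :
    p ∈ pvComb2 l ↔ ∃ i j : Nat, i < j ∧ l[i]? = some p.1 ∧ l[j]? = some p.2 := by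
  induction l with
  | nil => simp [pvComb2]
  | cons x xs ih =>
    simp only [pvComb2, List.mem_append, List.mem_map, ih]
    constructor
    · rintro (⟨y, hy, rfl⟩ | ⟨i, j, hij, hi, hj⟩)
      · obtain ⟨j, hj, he⟩ := List.getElem_of_mem hy
        exact ⟨0, j + 1, by omega, by simp, by simp [hj, he]⟩
      · exact ⟨i + 1, j + 1, by omega, by simpa using hi, by simpa using hj⟩
    · rintro ⟨i, j, hij, hi, hj⟩
      match i, j with
      | 0, j + 1 =>
        left
        simp only [List.getElem?_cons_zero, Option.some.injEq] at hi
        simp only [List.getElem?_cons_succ] at hj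
        exact ⟨p.2, List.mem_of_getElem? hj, by rw [hi]⟩
      | i + 1, j + 1 =>
        right
        simp only [List.getElem?_cons_succ] at hi hj
        exact ⟨i, j, by omega, hi, hj⟩

/-- characterisation of A's fold. -/
theorem foldA_spec (L : List ((Int × Int) × (Int × Int))) (b0 : Int) :
    let f := fun (biggest : Int) (pair : (Int × Int) × (Int × Int)) =>
      let nd := pair.2.2 - pair.1.2
      if nd < 0 then biggest
      else
        let idxd := pair.2.1 - pair.1.1
        if idxd > biggest then idxd else biggest
    b0 ≤ L.foldl f b0 ∧
    (∀ p ∈ L, p.1.2 ≤ p.2.2 → p.2.1 - p.1.1 ≤ L.foldl f b0) ∧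
    (L.foldl f b0 = b0 ∨ ∃ p ∈ L, p.1.2 ≤ p.2.2 ∧ L.foldl f b0 = p.2.1 - p.1.1) := by
  intro f
  induction L generalizing b0 with
  | nil => simp
  | cons q L ih =>
    have hstep : f b0 q = b0 ∨ (q.1.2 ≤ q.2.2 ∧ f b0 q = q.2.1 - q.1.1 ∧ b0 ≤ f b0 q) ∨
        (f b0 q = b0 ∧ q.1.2 ≤ q.2.2 ∧ q.2.1 - q.1.1 ≤ b0) := by
      simp only [f]
      split_ifs with h1 h2
      · exact Or.inl rfl
      · exact Or.inr (Or.inl ⟨by omega, rfl, by omega⟩)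
      · exact Or.inr (Or.inr ⟨rfl, by omega, by omega⟩)
    obtain ⟨ih1, ih2, ih3⟩ := ih (f b0 q)
    simp only [List.foldl_cons]
    refine ⟨?_, ?_, ?_⟩
    · rcases hstep with h | ⟨_, _, h⟩ | ⟨h, _, _⟩ <;> omega
    · intro p hp hle
      rcases List.mem_cons.mp hp with rfl | hp
      · rcases hstep with h | ⟨_, h, _⟩ | ⟨h, _, hb⟩
        · -- f b0 p = b0 means the contribution did not raise b0: ¬(p.2.1 - p.1.1 > b0) or skip
          have : p.2.1 - p.1.1 ≤ f b0 p := by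
            simp only [f]; split_ifs with h1 h2 <;> omega
          omega
        · omega
        · omega
      · exact ih2 p hp hle
    · rcases ih3 with h | ⟨p, hp, hle, he⟩
      · rcases hstep with hq | ⟨h1, h2, _⟩ | ⟨hq, _, _⟩
        · left; omega
        · right; exact ⟨q, List.mem_cons_self .., h1, by omega⟩
        · left; omega
      · right; exact ⟨p, List.mem_cons_of_mem _ hp, hle, he⟩

theorem getD_eq_of_getElem? {l : List Int} {i : Nat} {x : Int} (h : l[i]? = some x) :
    l.getD i 0 = x := by simp [List.getD, h]

theorem isBest_A (data : List Int) : IsBest data (largest_difference data) := by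
  unfold largest_difference
  obtain ⟨h1, h2, h3⟩ := foldA_spec (pvComb2 (PySem.List.enumerate data)) 0
  refine ⟨h1, ?_, ?_⟩
  · intro i j ⟨hij, hjn, hval⟩
    rcases Nat.eq_or_lt_of_le hij with rfl | hlt
    · simp only [Int.sub_self] at *; omega
    · have hin : i < data.length := lt_trans hlt hjn
      have hi : (PySem.List.enumerate data)[i]? = some ((i : Int), data[i]) := by
        simp [PySem.List.getElem?_enumerate, List.getElem?_eq_getElem hin]
      have hj : (PySem.List.enumerate data)[j]? = some ((j : Int), data[j]) := by
        simp [PySem.List.getElem?_enumerate, List.getElem?_eq_getElem hjn]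
      have hmem : (((i : Int), data[i]), ((j : Int), data[j])) ∈
          pvComb2 (PySem.List.enumerate data) :=
        mem_pvComb2.mpr ⟨i, j, hlt, hi, hj⟩
      have hd : data.getD i 0 = data[i] := by simp [List.getD, List.getElem?_eq_getElem hin]
      have hd' : data.getD j 0 = data[j] := by simp [List.getD, List.getElem?_eq_getElem hjn]
      have := h2 _ hmem (by rw [← hd, ← hd']; exact hval)
      simpa using this
  · rcases h3 with h | ⟨p, hp, hle, he⟩
    · left; exact h
    · right
      obtain ⟨i, j, hij, hi, hj⟩ := mem_pvComb2.mp hp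
      have hjn : j < data.length := by
        by_contra hc
        rw [PySem.List.getElem?_enumerate, List.getElem?_eq_none (by omega)] at hj
        simp at hj
      have hin : i < data.length := lt_trans hij hjn
      rw [PySem.List.getElem?_enumerate, List.getElem?_eq_getElem hin] at hi
      rw [PySem.List.getElem?_enumerate, List.getElem?_eq_getElem hjn] at hj
      simp only [Option.map_some, Option.some.injEq] at hi hj
      refine ⟨i, j, ⟨Nat.le_of_lt hij, hjn, ?_⟩, ?_⟩
      · have hd : data.getD i 0 = data[i] := by simp [List.getD, List.getElem?_eq_getElem hin]
        have hd' : data.getD j 0 = data[j] := by simp [List.getD, List.getElem?_eq_getElem hjn]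
        rw [← hi, ← hj] at hle
        rw [hd, hd']
        exact hle
      · rw [he, ← hi, ← hj]; simp

-- B-side invariants -------------------------------------------------------

/-- stack order: `a` above `b` means larger index, strictly smaller value. -/
def pvR (data : List Int) (a b : Nat) : Prop :=
  b < a ∧ data.getD a 0 < data.getD b 0

/-- invariant of Source B's first loop after processing `m` elements. -/
def StackInv (data : List Int) (m : Nat) (st : List Nat) : Prop :=
  st.Pairwise (pvR data) ∧ (∀ i ∈ st, i < m) ∧
    (∀ i', i' < m → ∃ i ∈ st, i ≤ i' ∧ data.getD i 0 ≤ data.getD i' 0)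

/-- soundness of the running best: it is an admissible gap (or 0). -/
def Sound (data : List Int) (b : Nat) : Prop :=
  b = 0 ∨ ∃ i j, GoodPair data i j ∧ b = j - i

theorem build_aux (data : List Int) : ∀ (l : List Int) (k : Nat) (st : List Nat),
    k ≤ data.length → data.drop k = l → StackInv data k st →
    StackInv data data.length ((l.zipIdx k).foldl
      (fun stack p =>
        match stack with
        | [] => p.2 :: stack
        | top :: _ => if data.getD top 0 > p.1 then p.2 :: stack else stack) st) := by
  intro l
  induction l with
  | nil =>
    intro k st hkle hdrop hinv
    have hk : data.length = k := by
      have := congrArg List.length hdrop; simp at this; omega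
    simp only [List.zipIdx_nil, List.foldl_nil]
    rw [hk]
    exact hinv
  | cons x xs ih =>
    intro k st hkle hdrop hinv
    have hkx : data[k]? = some x := by
      have h : (data.drop k)[0]? = data[k + 0]? := List.getElem?_drop
      rw [hdrop] at h; simpa using h.symm
    have hklt : k < data.length := (List.getElem?_eq_some_iff.mp hkx).1
    have hgk : data.getD k 0 = x := getD_eq_of_getElem? hkx
    have hdrop' : data.drop (k + 1) = xs := by
      have : data.drop (k + 1) = (data.drop k).drop 1 := by
        rw [List.drop_drop]
      rw [this, hdrop]; rfl
    obtain ⟨h1, h2, h3⟩ := hinv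
    rw [List.zipIdx_cons, List.foldl_cons]
    rcases st with _ | ⟨top, rest⟩
    · -- empty stack: push k
      refine ih (k + 1) [k] (by omega) hdrop' ⟨List.pairwise_singleton _ _, by simp, ?_⟩
      intro m hm
      rcases Nat.lt_or_ge m k with h | h
      · exact absurd (h3 m h) (by simp)
      · have hmk : m = k := by omega
        exact ⟨k, by simp, by omega, by simp [hmk]⟩
    · simp only
      split_ifs with hcond
      · -- push k
        refine ih (k + 1) (k :: top :: rest) (by omega) hdrop' ⟨?_, ?_, ?_⟩
        · rw [List.pairwise_cons]
          refine ⟨?_, h1⟩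
          intro b hb
          have hbk : b < k := h2 b hb
          refine ⟨hbk, ?_⟩
          rw [hgk]
          rcases List.mem_cons.mp hb with rfl | hb'
          · exact hcond
          · have := (List.pairwise_cons.mp h1).1 b hb'
            exact lt_trans hcond this.2
        · intro i hi
          rcases List.mem_cons.mp hi with rfl | hi'
          · omega
          · have := h2 i hi'; omega
        · intro m hm
          rcases Nat.lt_or_ge m k with h | h
          · obtain ⟨i, hi, hle, hv⟩ := h3 m h
            exact ⟨i, List.mem_cons_of_mem _ hi, hle, hv⟩
          · have hmk : m = k := by omega
            exact ⟨k, List.mem_cons_self .., by omega, by simp [hmk]⟩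
      · -- no push
        refine ih (k + 1) (top :: rest) (by omega) hdrop'
          ⟨h1, fun i hi => by have := h2 i hi; omega, ?_⟩
        intro m hm
        rcases Nat.lt_or_ge m k with h | h
        · exact h3 m h
        · have hmk : m = k := by omega
          refine ⟨top, List.mem_cons_self .., by have := h2 top (List.mem_cons_self ..); omega, ?_⟩
          rw [hmk, hgk]; omega

theorem build_inv (data : List Int) : StackInv data data.length (pvBuild data) := by
  unfold pvBuild
  exact build_aux data data 0 [] (Nat.zero_le _) (by simp)
    ⟨List.Pairwise.nil, by simp, fun i' h => absurd h (Nat.not_lt_zero _)⟩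

theorem pop_spec (data : List Int) (j : Nat) (hj : j < data.length) :
    ∀ (st : List Nat) (b : Nat), st.Pairwise (pvR data) → (∀ i ∈ st, i ≤ j) →
      Sound data b →
      (pvPop data j st b).1.Pairwise (pvR data) ∧
      (∀ i ∈ (pvPop data j st b).1, i ∈ st) ∧
      (∀ i ∈ (pvPop data j st b).1, data.getD j 0 < data.getD i 0) ∧
      b ≤ (pvPop data j st b).2 ∧
      (∀ i ∈ st, i ∈ (pvPop data j st b).1 ∨ j - i ≤ (pvPop data j st b).2) ∧
      Sound data (pvPop data j st b).2 := by
  intro st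
  induction st with
  | nil =>
    intro b _ _ hs
    simp [pvPop, hs]
  | cons top rest ih =>
    intro b hpw hbdd hs
    have htopj : top ≤ j := hbdd top (List.mem_cons_self ..)
    by_cases hcond : data.getD top 0 ≤ data.getD j 0
    · have hstep : pvPop data j (top :: rest) b =
          pvPop data j rest (if j - top > b then j - top else b) := by
        simp only [pvPop]
        rw [if_pos hcond]
      set b2 := if j - top > b then j - top else b with hb2
      have hsound2 : Sound data b2 := by
        rw [hb2]
        split_ifs with h
        · exact Or.inr ⟨top, j, ⟨htopj, hj, hcond⟩, rfl⟩
        · exact hs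
      have hb2le : b ≤ b2 := by rw [hb2]; split_ifs <;> omega
      have hjtople : j - top ≤ b2 := by rw [hb2]; split_ifs <;> omega
      obtain ⟨p1, p2, p3, p4, p5, p6⟩ := ih b2 (List.pairwise_cons.mp hpw).2
        (fun i hi => hbdd i (List.mem_cons_of_mem _ hi)) hsound2
      rw [hstep]
      refine ⟨p1, fun i hi => List.mem_cons_of_mem _ (p2 i hi), p3, le_trans hb2le p4, ?_, p6⟩
      intro i hi
      rcases List.mem_cons.mp hi with rfl | hi'
      · exact Or.inr (le_trans hjtople p4)
      · rcases p5 i hi' with h | h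
        · exact Or.inl h
        · exact Or.inr h
    · have hstep : pvPop data j (top :: rest) b = (top :: rest, b) := by
        simp only [pvPop]
        rw [if_neg hcond]
      rw [hstep]
      refine ⟨hpw, fun i hi => hi, ?_, le_refl _, fun i hi => Or.inl hi, hs⟩
      intro i hi
      rcases List.mem_cons.mp hi with rfl | hi'
      · omega
      · have hv := ((List.pairwise_cons.mp hpw).1 i hi').2
        omega

theorem scan_spec (data : List Int) : ∀ (jn : Nat) (st : List Nat) (b : Nat),
    jn ≤ data.length → st.Pairwise (pvR data) → (∀ i ∈ st, i < jn) → Sound data b →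
    (∀ i j', GoodPair data i j' → j' - i ≤ b ∨
      (j' < jn ∧ ∃ i'' ∈ st, i'' ≤ i ∧ data.getD i'' 0 ≤ data.getD i 0)) →
    Sound data (pvScan data jn st b) ∧
      (∀ i j', GoodPair data i j' → j' - i ≤ pvScan data jn st b) := by
  intro jn
  induction jn with
  | zero =>
    intro st b _ _ _ hs hcomp
    refine ⟨hs, ?_⟩
    intro i j' hg
    rcases hcomp i j' hg with h | ⟨h, _⟩
    · exact h
    · omega
  | succ jn ih =>
    intro st b hle hpw hbdd hs hcomp
    have hj : jn < data.length := by omega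
    obtain ⟨p1, p2, p3, p4, p5, p6⟩ :=
      pop_spec data jn hj st b hpw (fun i hi => by have := hbdd i hi; omega) hs
    simp only [pvScan]
    apply ih _ _ (by omega) p1 _ p6
    · -- new completeness
      intro i j' hg
      rcases hcomp i j' hg with h | ⟨hj', i'', hi''mem, hi''le, hi''v⟩
      · exact Or.inl (le_trans h p4)
      · rcases p5 i'' hi''mem with hin | hpopped
        · -- i'' survived the pops
          rcases Nat.lt_or_ge j' jn with hlt | hge
          · exact Or.inr ⟨hlt, i'', hin, hi''le, hi''v⟩
          · -- j' = jn: impossible, i'' would have been popped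
            have hj'eq : j' = jn := by omega
            subst hj'eq
            have h1 := p3 i'' hin
            have h2 : data.getD i'' 0 ≤ data.getD j' 0 := le_trans hi''v hg.2.2
            omega
        · -- i'' was popped: jn - i'' counts
          have : j' - i ≤ jn - i'' := by
            have hj'le : j' ≤ jn := by omega
            omega
          exact Or.inl (le_trans this hpopped)
    · -- new index bound
      intro i hi
      have h1 := p3 i hi
      have h2 : i ≤ jn := by have := hbdd i (p2 i hi); omega
      rcases Nat.eq_or_lt_of_le h2 with rfl | h
      · omega
      · exact h

theorem isBest_B (data : List Int) : IsBest data (largest_difference_alt data) := by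
  unfold largest_difference_alt
  obtain ⟨s1, s2, s3⟩ := build_inv data
  obtain ⟨hsound, hbound⟩ := scan_spec data data.length (pvBuild data) 0 (le_refl _)
    s1 s2 (Or.inl rfl)
    (fun i j' hg => Or.inr ⟨hg.2.1, by
      obtain ⟨i'', hm, hle, hv⟩ := s3 i (lt_of_le_of_lt hg.1 hg.2.1)
      exact ⟨i'', hm, hle, hv⟩⟩)
  refine ⟨Int.natCast_nonneg _, ?_, ?_⟩
  · intro i j hg
    have := hbound i j hg
    have hij := hg.1
    omega
  · rcases hsound with h | ⟨i, j, hg, he⟩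
    · left; rw [h]; rfl
    · right
      refine ⟨i, j, hg, ?_⟩
      have hij := hg.1
      omega

-- ===== VERDICT (by name: the statement is the Claim_ definition above) =====
theorem largest_difference_spec : Claim_equal_largest_difference := by
  intro data _
  unfold Spec_largest_difference
  exact isBest_unique (isBest_A data) (isBest_B data)
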